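-- pv_equiv track=rewrite | github.com/vrejhead/AOC23 | day13pt2.py | maybe
-- ===== SOURCE A (Python) =====
-- def maybe(line1, line2, flag=True): # flag means to allow an error or not, True=allow, False=dont allow
--     for x, y in zip(line1, line2):
--         if x != y:
--             if flag:
--                 flag = False
--             else:
--                 return False, None
--     return True, flag # return if the error is used or not
-- ===== SOURCE B (Python) =====
-- def maybe(line1, line2, flag=True):
--     count = sum(1 for x, y in zip(line1, line2) if x != y)
--     if count == 0:
--         return True, flag
--     if count == 1 and flag:
--         return True, False
--     return False, None
-- ===== Notes on version B (the rewrite author's own statement) =====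
-- stated objective: simpler
-- what changed: Replaces the stateful early-return loop (flag mutated inside the loop) with a single counting pass over the zipped characters followed by one post-loop decision on the mismatch count.
import Mathlib
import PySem

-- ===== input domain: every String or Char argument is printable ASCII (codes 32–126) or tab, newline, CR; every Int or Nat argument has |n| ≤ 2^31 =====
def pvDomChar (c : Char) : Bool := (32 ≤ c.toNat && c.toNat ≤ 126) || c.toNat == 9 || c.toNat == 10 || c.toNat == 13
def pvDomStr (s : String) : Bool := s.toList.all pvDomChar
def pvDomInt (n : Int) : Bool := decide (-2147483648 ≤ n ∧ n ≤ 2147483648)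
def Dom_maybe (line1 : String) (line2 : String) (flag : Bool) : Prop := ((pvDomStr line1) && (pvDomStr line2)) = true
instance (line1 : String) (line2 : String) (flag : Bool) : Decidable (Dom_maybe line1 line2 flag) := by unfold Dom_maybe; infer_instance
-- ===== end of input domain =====

-- B replaces A's stateful early-return loop by one mismatch-counting pass plus a post-loop decision (simpler decomposition).


-- ===== PORT A =====
-- the for-loop with mutable flag and early return, as structural recursion over the zipped characters
def maybeLoop : List (Char × Char) → Bool → Bool × Option Bool
  | [], flag => (true, some flag)
  | (x, y) :: rest, flag =>
    if x ≠ y then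
      if flag then maybeLoop rest false
      else (false, none)
    else maybeLoop rest flag

def maybe (line1 : String) (line2 : String) (flag : Bool) : Bool × Option Bool :=
  maybeLoop (line1.toList.zip line2.toList) flag

-- ===== PORT B =====
def maybe_alt (line1 : String) (line2 : String) (flag : Bool) : Bool × Option Bool :=
  let count := (line1.toList.zip line2.toList).countP (fun p => p.1 ≠ p.2)
  if count = 0 then (true, some flag)
  else if count = 1 ∧ flag then (true, some false)
  else (false, none)

-- ===== PRECONDITION & SPEC =====
def Spec_maybe (line1 : String) (line2 : String) (flag : Bool) (out : Bool × Option Bool) : Prop := out = maybe_alt line1 line2 flag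
instance (line1 : String) (line2 : String) (flag : Bool) (out : Bool × Option Bool) : Decidable (Spec_maybe line1 line2 flag out) := by unfold Spec_maybe; infer_instance

-- ===== CLAIM (what is proved, stated in full; the proofs are below) =====
def Claim_equal_maybe : Prop := ∀ (line1 : String) (line2 : String) (flag : Bool), Dom_maybe line1 line2 flag → Spec_maybe line1 line2 flag (maybe line1 line2 flag)

-- ===== LEMMAS AND PROOFS =====

theorem maybeLoop_eq_count (zs : List (Char × Char)) (flag : Bool) :
    maybeLoop zs flag =
      (let c := zs.countP (fun p => p.1 ≠ p.2)
       if c = 0 then (true, some flag)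
       else if c = 1 ∧ flag then (true, some false)
       else (false, none)) := by
  induction zs generalizing flag with
  | nil => simp [maybeLoop]
  | cons hd tl ih =>
    obtain ⟨x, y⟩ := hd
    by_cases hxy : x = y
    · simp [maybeLoop, hxy, ih flag]
    · cases flag with
      | false =>
        simp [maybeLoop, hxy]
      | true =>
        simp [maybeLoop, hxy, ih false]

-- ===== VERDICT (by name: the statement is the Claim_ definition above) =====
theorem maybe_spec : Claim_equal_maybe := by
  intro line1 line2 flag _
  unfold Spec_maybe maybe maybe_alt
  simpa using maybeLoop_eq_count (line1.toList.zip line2.toList) flag
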